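-- pv_equiv track=rewrite | github.com/nahmxp/Product-detection | app.py | merge_class_names
-- ===== SOURCE A (Python) =====
-- def merge_class_names(old_classes, new_classes):
--     """
--     Merge class names from old model and new dataset.
--     Preserves old class indices and adds new classes.
--
--     Args:
--         old_classes: dict or list from trained model
--         new_classes: list from new dataset YAML
--
--     Returns:
--         merged_classes: list of all unique class names
--         class_mapping: dict mapping new dataset indices to merged indices
--     """
--     # Convert old_classes to list if it's a dict
--     if isinstance(old_classes, dict):
--         old_classes_list = [old_classes[i] for i in sorted(old_classes.keys())]
--     else:
--         old_classes_list = list(old_classes)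
--
--     # Start with old classes
--     merged_classes = old_classes_list.copy()
--     class_mapping = {}
--
--     # Add new classes that don't exist in old classes
--     for idx, new_class in enumerate(new_classes):
--         if new_class in merged_classes:
--             # Class already exists, map to existing index
--             class_mapping[idx] = merged_classes.index(new_class)
--         else:
--             # New class, add to merged list
--             class_mapping[idx] = len(merged_classes)
--             merged_classes.append(new_class)
--
--     return merged_classes, class_mapping
-- ===== SOURCE B (Python) =====
-- def merge_class_names(old_classes, new_classes):
--     """
--     Merge class names from old model and new dataset.
--     Two-phase version: first build the merged list alone, then derive the
--     index mapping from a name->first-index lookup built in one scan.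
--     """
--     if isinstance(old_classes, dict):
--         merged_classes = [old_classes[i] for i in sorted(old_classes.keys())]
--     else:
--         merged_classes = list(old_classes)
--
--     # Phase 1: complete the merged list (append each unseen new class).
--     for new_class in new_classes:
--         if new_class not in merged_classes:
--             merged_classes.append(new_class)
--
--     # Phase 2: one scan builds a first-occurrence index for every name ...
--     lookup = {}
--     for i, name in enumerate(merged_classes):
--         if name not in lookup:
--             lookup[name] = i
--
--     # ... and the mapping is a single dict-comprehension over new_classes.
--     class_mapping = {idx: lookup[new_class]
--                      for idx, new_class in enumerate(new_classes)}
--     return merged_classes, class_mapping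
-- ===== Notes on version B (the rewrite author's own statement) =====
-- stated objective: alternative
-- what changed: B separates list construction from mapping derivation: it first completes merged_classes alone, then builds a name-to-first-index dict in one scan and computes class_mapping as a dict-comprehension of O(1) lookups, replacing A's interleaved grow-and-map loop with its repeated merged_classes.index scans.
import Mathlib
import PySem

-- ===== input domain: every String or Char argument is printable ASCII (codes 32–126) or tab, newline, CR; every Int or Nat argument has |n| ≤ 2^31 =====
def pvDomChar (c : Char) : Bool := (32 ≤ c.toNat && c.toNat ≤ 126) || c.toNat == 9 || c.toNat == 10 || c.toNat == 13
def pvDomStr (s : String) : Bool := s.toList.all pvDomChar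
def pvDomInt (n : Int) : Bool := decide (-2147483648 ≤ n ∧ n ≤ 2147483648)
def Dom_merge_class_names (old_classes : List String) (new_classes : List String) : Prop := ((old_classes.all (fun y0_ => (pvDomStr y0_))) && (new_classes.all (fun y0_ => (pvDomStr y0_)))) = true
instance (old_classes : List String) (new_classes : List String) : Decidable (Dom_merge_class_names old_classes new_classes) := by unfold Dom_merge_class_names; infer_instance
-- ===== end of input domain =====

-- B separates list construction from mapping derivation: first complete merged_classes,
-- then build a name→first-index dict in one scan and derive class_mapping by lookups.
-- (old_classes : List String, so the Python dict branch of the isinstance test never applies.)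

-- ===== PORT A =====
-- A's single interleaved loop: grow merged_classes and record the mapping as it goes.
-- `merged_classes.index(new_class)` is guarded by the membership test, so index? is `some`;
-- `.getD 0` only unwraps it.
def merge_class_names (old_classes : List String) (new_classes : List String) : List String × (List (Int × Int)) :=
  let old_classes_list := old_classes
  let st := (PySem.List.enumerate new_classes 0).foldl
    (fun (st : List String × PySem.Dict Int Int) (p : Int × String) =>
      if p.2 ∈ st.1 then
        (st.1, st.2.insert p.1 (((PySem.List.index? st.1 p.2).getD 0 : Nat) : Int))
      else
        (st.1 ++ [p.2], st.2.insert p.1 (st.1.length : Int)))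
    (old_classes_list, PySem.Dict.empty)
  (st.1, st.2.items)

-- ===== PORT B =====
-- `lookup[new_class]` cannot raise (every new class is in merged_classes); `.getD 0` only unwraps.
def merge_class_names_alt (old_classes : List String) (new_classes : List String) : List String × (List (Int × Int)) :=
  let merged_classes := new_classes.foldl
    (fun (m : List String) (nc : String) => if nc ∈ m then m else m ++ [nc]) old_classes
  let lookup := (PySem.List.enumerate merged_classes 0).foldl
    (fun (d : PySem.Dict String Int) (p : Int × String) =>
      if d.contains p.2 then d else d.insert p.2 p.1)
    PySem.Dict.empty
  let class_mapping := (PySem.List.enumerate new_classes 0).foldl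
    (fun (d : PySem.Dict Int Int) (p : Int × String) => d.insert p.1 (lookup.getD p.2 0))
    PySem.Dict.empty
  (merged_classes, class_mapping.items)

-- ===== PRECONDITION & SPEC =====
def Spec_merge_class_names (old_classes : List String) (new_classes : List String) (out : List String × (List (Int × Int))) : Prop := out = merge_class_names_alt old_classes new_classes
instance (old_classes : List String) (new_classes : List String) (out : List String × (List (Int × Int))) : Decidable (Spec_merge_class_names old_classes new_classes out) := by unfold Spec_merge_class_names; infer_instance

-- ===== CLAIM (what is proved, stated in full; the proofs are below) =====
def Claim_equal_merge_class_names : Prop := ∀ (old_classes : List String) (new_classes : List String), Dom_merge_class_names old_classes new_classes → Spec_merge_class_names old_classes new_classes (merge_class_names old_classes new_classes)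

-- ===== LEMMAS AND PROOFS =====

-- B's merged-list fold (also the first component of A's fold).
def pvAddAll (m : List String) (ns : List String) : List String :=
  ns.foldl (fun (m : List String) (nc : String) => if nc ∈ m then m else m ++ [nc]) m

-- First index of x in l, as the Int both ports record.
def pvIdxZ (l : List String) (x : String) : Int := ((PySem.List.index? l x).getD 0 : Nat)

lemma pvAddAll_prefix (ns : List String) : ∀ m, ∃ t, pvAddAll m ns = m ++ t := by
  induction ns with
  | nil => intro m; exact ⟨[], by simp [pvAddAll]⟩
  | cons x ns ih =>
    intro m
    simp only [pvAddAll, List.foldl_cons]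
    by_cases hx : x ∈ m
    · simpa [hx, pvAddAll] using ih m
    · obtain ⟨t, ht⟩ := ih (m ++ [x])
      exact ⟨[x] ++ t, by simpa [hx, pvAddAll, List.append_assoc] using ht⟩

lemma pvMem_addAll_of_mem (ns : List String) : ∀ m x, x ∈ m → x ∈ pvAddAll m ns := by
  intro ns_m x hx
  obtain ⟨t, ht⟩ := pvAddAll_prefix ns ns_m
  rw [ht]; exact List.mem_append_left _ hx

lemma pvMem_addAll_of_mem_ns (ns : List String) : ∀ m x, x ∈ ns → x ∈ pvAddAll m ns := by
  induction ns with
  | nil => intro m x hx; cases hx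
  | cons y ns ih =>
    intro m x hx
    simp only [pvAddAll, List.foldl_cons]
    rcases List.mem_cons.mp hx with h | h
    · subst h
      by_cases hy : x ∈ m
      · simpa [pvAddAll, hy] using pvMem_addAll_of_mem ns m x hy
      · simpa [pvAddAll, hy] using pvMem_addAll_of_mem ns (m ++ [x]) x (by simp)
    · by_cases hy : y ∈ m
      · simpa [hy, pvAddAll] using ih m x h
      · simpa [hy, pvAddAll] using ih (m ++ [y]) x h

-- index into the final merged list agrees with the index at insertion time
lemma pvIdxZ_addAll (ns : List String) (m : List String) (x : String) (hx : x ∈ m) :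
    pvIdxZ (pvAddAll m ns) x = pvIdxZ m x := by
  obtain ⟨t, ht⟩ := pvAddAll_prefix ns m
  rw [ht]
  unfold pvIdxZ
  rw [PySem.List.index?_append_of_mem t hx]

-- A's interleaved fold, fully characterised.
lemma pvA_fold (ns : List String) : ∀ (s : Int) (m : List String) (d : PySem.Dict Int Int),
    (∀ k ∈ d.keys, k < s) →
    (PySem.List.enumerate ns s).foldl
      (fun (st : List String × PySem.Dict Int Int) (p : Int × String) =>
        if p.2 ∈ st.1 then
          (st.1, st.2.insert p.1 (((PySem.List.index? st.1 p.2).getD 0 : Nat) : Int))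
        else
          (st.1 ++ [p.2], st.2.insert p.1 (st.1.length : Int)))
      (m, d)
    = (pvAddAll m ns,
       PySem.Dict.mk (d.items ++ (PySem.List.enumerate ns s).map
         (fun p => (p.1, pvIdxZ (pvAddAll m ns) p.2)))) := by
  induction ns with
  | nil =>
    intro s m d _
    simp [pvAddAll, PySem.List.enumerate_nil]
  | cons x ns ih =>
    intro s m d hd
    have hnc : d.contains s = false := by
      rw [PySem.Dict.contains_eq_decide_mem_keys]
      simp only [decide_eq_false_iff_not]
      intro hmem; exact absurd rfl (Int.ne_of_lt (hd s hmem)).symm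
    rw [PySem.List.enumerate_cons, List.foldl_cons]
    by_cases hx : x ∈ m
    · have hkeys : ∀ k ∈ (d.insert s (((PySem.List.index? m x).getD 0 : Nat) : Int)).keys, k < s + 1 := by
        intro k hk
        rcases (PySem.Dict.mem_keys_insert _ _ _ _).mp hk with h | h
        · subst h; omega
        · have := hd k h; omega
      rw [if_pos hx, ih (s + 1) m _ hkeys]
      have hidx : pvIdxZ (pvAddAll m ns) x = (((PySem.List.index? m x).getD 0 : Nat) : Int) := by
        rw [pvIdxZ_addAll ns m x hx]; rfl
      have hM : pvAddAll m (x :: ns) = pvAddAll m ns := by simp [pvAddAll, hx]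
      refine Prod.ext hM.symm ?_
      apply PySem.Dict.ext
      rw [PySem.Dict.items_insert_of_not_contains _ _ hnc]
      simp [hM, hidx]
    · have hkeys : ∀ k ∈ (d.insert s (m.length : Int)).keys, k < s + 1 := by
        intro k hk
        rcases (PySem.Dict.mem_keys_insert _ _ _ _).mp hk with h | h
        · subst h; omega
        · have := hd k h; omega
      rw [if_neg hx, ih (s + 1) (m ++ [x]) _ hkeys]
      have hM : pvAddAll m (x :: ns) = pvAddAll (m ++ [x]) ns := by
        simp [pvAddAll, hx]
      have hidx : pvIdxZ (pvAddAll (m ++ [x]) ns) x = (m.length : Int) := by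
        have hmem : x ∈ m ++ [x] := by simp
        rw [pvIdxZ_addAll ns (m ++ [x]) x hmem]
        unfold pvIdxZ
        rw [PySem.List.index?_append_singleton_self m x hx]
        rfl
      refine Prod.ext hM.symm ?_
      apply PySem.Dict.ext
      rw [PySem.Dict.items_insert_of_not_contains _ _ hnc]
      simp [hM, hidx]

-- B's lookup fold, fully characterised.
lemma pvLookup_fold (l : List String) : ∀ (s : Int) (d : PySem.Dict String Int) (x : String),
    ((PySem.List.enumerate l s).foldl
      (fun (d : PySem.Dict String Int) (p : Int × String) =>
        if d.contains p.2 then d else d.insert p.2 p.1) d).get? x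
    = if d.contains x then d.get? x
      else (PySem.List.index? l x).map (fun k => s + (k : Int)) := by
  induction l with
  | nil =>
    intro s d x
    simp only [PySem.List.enumerate_nil, List.foldl_nil]
    by_cases hcx : d.contains x
    · simp [hcx]
    · simp only [hcx, PySem.List.index?]
      simp [(PySem.Dict.get?_eq_none_iff_contains _ _).mpr (by simpa using hcx)]
  | cons y l ih =>
    intro s d x
    rw [PySem.List.enumerate_cons, List.foldl_cons]
    by_cases hc : d.contains y
    · rw [if_pos hc]
      rw [ih]
      by_cases hxy : x = y
      · subst hxy; simp [hc]
      · rw [PySem.List.index?_cons_of_ne l (fun h => hxy h.symm)]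
        by_cases hcx : d.contains x
        · simp [hcx]
        · simp only [hcx]
          cases h : PySem.List.index? l x
          · simp
          · simp
            omega
    · rw [if_neg hc, ih]
      by_cases hxy : x = y
      · subst hxy
        rw [PySem.List.index?_cons_self]
        simp [PySem.Dict.contains_insert_self, PySem.Dict.get?_insert_self, hc]
      · rw [PySem.Dict.contains_insert, PySem.Dict.get?_insert_of_ne _ _ hxy,
          PySem.List.index?_cons_of_ne l (fun h => hxy h.symm)]
        have : (x == y) = false := by simp [hxy]
        rw [this]
        simp only [Bool.false_or]
        by_cases hcx : d.contains x
        · simp [hcx]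
        · simp only [hcx]
          cases h : PySem.List.index? l x
          · simp
          · simp
            omega

-- ===== VERDICT (by name: the statement is the Claim_ definition above) =====
theorem merge_class_names_spec : Claim_equal_merge_class_names := by
  intro old_classes new_classes _
  unfold Spec_merge_class_names merge_class_names merge_class_names_alt
  have hA := pvA_fold new_classes 0 old_classes PySem.Dict.empty
    (by intro k hk; simp [PySem.Dict.keys_empty] at hk)
  simp only [hA]
  have hfresh : ∀ p ∈ PySem.List.enumerate new_classes 0,
      (PySem.Dict.empty : PySem.Dict Int Int).contains p.1 = false := by
    intro p _; exact PySem.Dict.contains_empty _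
  have hnodup : ((PySem.List.enumerate new_classes 0).map (·.1)).Nodup := by
    have hpw := PySem.List.pairwise_lt_enumerate new_classes 0
    exact List.Pairwise.map _ (fun {a b} h => ne_of_lt h) hpw
  rw [PySem.Dict.items_foldl_insert_fresh _ _ _ _ hfresh hnodup]
  refine Prod.ext rfl ?_
  simp only [PySem.Dict.empty, List.nil_append]
  rw [show (List.foldl (fun (m : List String) (nc : String) => if nc ∈ m then m else m ++ [nc]) old_classes new_classes) = pvAddAll old_classes new_classes from rfl,
     show (PySem.Dict.mk ([] : List (String × Int))) = PySem.Dict.empty from rfl]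
  apply List.map_congr_left
  intro p hp
  have hmem : p.2 ∈ new_classes := by
    rcases (PySem.List.mem_enumerate_iff _ _ _).mp hp with ⟨k, hk, rfl⟩
    simp
  have hmemM : p.2 ∈ pvAddAll old_classes new_classes :=
    pvMem_addAll_of_mem_ns new_classes old_classes p.2 hmem
  have hsome : (PySem.List.index? (pvAddAll old_classes new_classes) p.2).isSome := by
    rw [PySem.List.index?_isSome_iff]; exact hmemM
  obtain ⟨k, hk⟩ := Option.isSome_iff_exists.mp hsome
  have hL := pvLookup_fold (pvAddAll old_classes new_classes) 0 PySem.Dict.empty p.2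
  rw [PySem.Dict.getD_eq_get?_getD, hL, PySem.Dict.contains_empty, if_neg (by simp), hk]
  have hk' := hk
  rw [PySem.List.index?_eq_idxOf?] at hk'
  simp [pvIdxZ, hk']
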